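-- pv_equiv track=rewrite | github.com/michaelarutyunov/interview-system-v2 | src/services/canonical_graph_service.py | _bfs_depth
-- ===== SOURCE A (Python) =====
-- from typing import Dict, List, Set
--
-- def _bfs_depth(adjacency: Dict[str, List[str]], start: str) -> int:
--     """
--     Compute max depth from start node using iterative BFS.
--
--     Args:
--         adjacency: Adjacency list mapping slot_id to neighbors
--         start: Starting node ID
--
--     Returns:
--         Maximum depth from start node
--     """
--     from collections import deque
--
--     visited: Set[str] = set()
--     queue = deque([(start, 0)])  # (node, depth)
--     max_depth = 0
--
--     while queue:
--         node, depth = queue.popleft()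
--
--         if node in visited:
--             continue
--         visited.add(node)
--
--         max_depth = max(max_depth, depth)
--
--         for neighbor in adjacency.get(node, []):
--             if neighbor not in visited:
--                 queue.append((neighbor, depth + 1))
--
--     return max_depth
-- ===== SOURCE B (Python) =====
-- from typing import Dict, List
--
-- def _bfs_depth(adjacency: Dict[str, List[str]], start: str) -> int:
--     """Max depth from start: level-synchronous BFS over whole frontiers."""
--     visited = set()
--     current = {start}
--     depth = 0
--     while current:
--         visited |= current
--         next_frontier = {y for x in current
--                          for y in adjacency.get(x, [])
--                          if y not in visited}
--         if not next_frontier: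
--             break
--         depth += 1
--         current = next_frontier
--     return depth
-- ===== Notes on version B (the rewrite author's own statement) =====
-- stated objective: alternative
-- what changed: Replaces A's FIFO queue of (node, depth) pairs with per-node depth tagging and a running max by level-synchronous BFS: a frontier set per level, visited marked a whole level at a time, and a level counter incremented only when the next frontier is non-empty.
import Mathlib
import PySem

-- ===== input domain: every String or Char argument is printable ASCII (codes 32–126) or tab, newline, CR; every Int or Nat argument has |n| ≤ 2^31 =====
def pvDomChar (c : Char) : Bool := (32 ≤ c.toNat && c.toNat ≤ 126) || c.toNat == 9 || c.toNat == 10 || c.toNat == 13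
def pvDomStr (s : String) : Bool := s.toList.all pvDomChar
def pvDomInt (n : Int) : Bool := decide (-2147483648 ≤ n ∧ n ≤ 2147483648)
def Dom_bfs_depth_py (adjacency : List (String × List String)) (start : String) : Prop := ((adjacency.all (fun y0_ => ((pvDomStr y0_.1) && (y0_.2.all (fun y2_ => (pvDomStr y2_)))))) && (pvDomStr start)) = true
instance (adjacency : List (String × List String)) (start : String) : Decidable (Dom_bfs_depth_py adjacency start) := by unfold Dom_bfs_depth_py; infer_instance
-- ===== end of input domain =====

-- B replaces A's per-node depth-tagged queue by level-synchronous BFS over whole frontier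
-- sets (objective: alternative decomposition; same asymptotic cost).

-- ===== PORT A =====
-- Termination helpers for the two while-loops (cited by name in decreasing_by).

-- A filter by a stronger predicate, with a witness element the stronger one rejects, is strictly shorter.
theorem pvFilterLenLt {p q : String → Bool} (U : List String)
    (hmono : ∀ u, q u = true → p u = true) {y : String}
    (hyU : y ∈ U) (hyp : p y = true) (hyq : q y = false) :
    (U.filter q).length < (U.filter p).length := by
  have hsub : (U.filter q).Sublist (U.filter p) := List.monotone_filter_right U hmono
  rcases Nat.lt_or_ge (U.filter q).length (U.filter p).length with h | h
  · exact h
  · exfalso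
    have heq : U.filter q = U.filter p := hsub.eq_of_length_le h
    have hy : y ∈ U.filter p := List.mem_filter.2 ⟨hyU, hyp⟩
    rw [← heq] at hy
    have := (List.mem_filter.1 hy).2
    simp [hyq] at this

-- Bridges between the Bool filter predicate and set membership.
theorem pvNCT (s : PySem.Set String) (u : String) :
    (!(PySem.Set.contains s u)) = true ↔ u ∉ s := by
  rw [← PySem.Set.contains_iff]
  cases PySem.Set.contains s u <;> simp

theorem pvNCF (s : PySem.Set String) (u : String) :
    (!(PySem.Set.contains s u)) = false ↔ u ∈ s := by
  rw [← PySem.Set.contains_iff]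
  cases PySem.Set.contains s u <;> simp

-- Monotone special case: growing the visited set cannot lengthen the unvisited filter.
theorem pvCntMono (U : List String) (vis : PySem.Set String) (x : String) :
    ((U.filter (fun u => !(PySem.Set.contains (PySem.Set.add vis x) u))).length) ≤
    ((U.filter (fun u => !(PySem.Set.contains vis u))).length) := by
  refine (List.monotone_filter_right U ?_).length_le
  intro u hu
  rw [pvNCT] at hu ⊢
  intro hm
  exact hu ((PySem.Set.mem_add vis x u).2 (Or.inl hm))

-- An element of a dict lookup's value occurs among the stored entries.
theorem pvMemGetD (adjacency : List (String × List String)) (x y : String)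
    (hy : y ∈ (PySem.Dict.mk adjacency).getD x []) :
    y ∈ adjacency.flatMap (fun p => p.1 :: p.2) := by
  induction adjacency with
  | nil => simp [PySem.Dict.getD, PySem.Dict.get?] at hy
  | cons p ps ih =>
    by_cases hx : (p.1 == x) = true
    · have : y ∈ p.2 := by
        simpa [PySem.Dict.getD, PySem.Dict.get?, List.find?, hx] using hy
      simp only [List.flatMap_cons, List.mem_append, List.mem_cons]
      exact Or.inl (Or.inr this)
    · have hx' : (p.1 == x) = false := by simpa using hx
      have := ih (by simpa [PySem.Dict.getD, PySem.Dict.get?, List.find?, hx'] using hy)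
      simp only [List.flatMap_cons, List.mem_append] at this ⊢
      exact Or.inr this

-- A key whose lookup is non-default occurs among the stored entries.
theorem pvKeyMem (adjacency : List (String × List String)) (x : String)
    (h : (PySem.Dict.mk adjacency).getD x [] ≠ []) :
    x ∈ adjacency.flatMap (fun p => p.1 :: p.2) := by
  induction adjacency with
  | nil => simp [PySem.Dict.getD, PySem.Dict.get?] at h
  | cons p ps ih =>
    by_cases hx : (p.1 == x) = true
    · have : p.1 = x := by simpa using hx
      simp only [List.flatMap_cons, List.mem_append, List.mem_cons]
      exact Or.inl (Or.inl this.symm)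
    · have hx' : (p.1 == x) = false := by simpa using hx
      have := ih (by simpa [PySem.Dict.getD, PySem.Dict.get?, List.find?, hx'] using h)
      simp only [List.flatMap_cons, List.mem_append] at this ⊢
      exact Or.inr this

-- Dict lookup with default [] never exceeds the total number of stored neighbours.
theorem pvGetDLenLe (adjacency : List (String × List String)) (x : String) :
    ((PySem.Dict.mk adjacency).getD x []).length ≤ (adjacency.map (fun p => p.2.length)).sum := by
  induction adjacency with
  | nil => simp [PySem.Dict.getD, PySem.Dict.get?]
  | cons p ps ih =>
    by_cases hx : (p.1 == x) = true
    · simp [PySem.Dict.getD, PySem.Dict.get?, List.find?, hx]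
    · have hx' : (p.1 == x) = false := by simpa using hx
      have h2 : (PySem.Dict.mk (p :: ps)).getD x [] = (PySem.Dict.mk ps).getD x [] := by
        simp [PySem.Dict.getD, PySem.Dict.get?, List.find?, hx']
      rw [h2]
      simp only [List.map_cons, List.sum_cons]
      omega

-- Literal port of A's while loop: FIFO queue of (node, depth) pairs, visited set, running max.
def pvALoop (adjacency : List (String × List String)) (vis : PySem.Set String)
    (q : List (String × Int)) (m : Int) : Int :=
  match q with
  | [] => m
  | (node, depth) :: rest =>
    if PySem.Set.contains vis node then pvALoop adjacency vis rest m
    else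
      pvALoop adjacency (PySem.Set.add vis node)
        (rest ++ (((PySem.Dict.mk adjacency).getD node []).filter
            (fun nb => !(PySem.Set.contains (PySem.Set.add vis node) nb))).map
            (fun nb => (nb, depth + 1)))
        (max m depth)
  termination_by q.length + (1 + (adjacency.map (fun p => p.2.length)).sum) *
    ((adjacency.flatMap (fun p => p.1 :: p.2)).filter
      (fun u => !(PySem.Set.contains vis u))).length
  decreasing_by
  · simp only [List.length_cons]
    omega
  · rename_i hnode
    have hmono := pvCntMono (adjacency.flatMap (fun p => p.1 :: p.2)) vis node
    have hflt : (((PySem.Dict.mk adjacency).getD node []).filter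
        (fun nb => !(PySem.Set.contains (PySem.Set.add vis node) nb))).length ≤
        ((PySem.Dict.mk adjacency).getD node []).length := List.length_filter_le _ _
    by_cases hemp : (PySem.Dict.mk adjacency).getD node [] = []
    · have h1 := Nat.mul_le_mul_left (1 + (adjacency.map (fun p => p.2.length)).sum)
        (pvCntMono (adjacency.flatMap (fun p => p.1 :: p.2)) vis node)
      simp only [hemp, List.filter_nil, List.map_nil, List.append_nil, List.length_cons]
      linarith [h1]
    · have hlen : ((PySem.Dict.mk adjacency).getD node []).length ≤
          (adjacency.map (fun p => p.2.length)).sum := pvGetDLenLe adjacency node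
      have hcnt : (((adjacency.flatMap (fun p => p.1 :: p.2)).filter
            (fun u => !(PySem.Set.contains (PySem.Set.add vis node) u))).length) <
          (((adjacency.flatMap (fun p => p.1 :: p.2)).filter
            (fun u => !(PySem.Set.contains vis u))).length) := by
        refine pvFilterLenLt _ ?_ (pvKeyMem adjacency node hemp) ?_ ?_
        · intro u hu
          rw [pvNCT] at hu ⊢
          intro hm
          exact hu ((PySem.Set.mem_add vis node u).2 (Or.inl hm))
        · rw [pvNCT]
          exact fun hm => hnode ((PySem.Set.contains_iff vis node).2 hm)
        · rw [pvNCF]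
          exact (PySem.Set.mem_add vis node node).2 (Or.inr rfl)
      have h1 : (1 + (adjacency.map (fun p => p.2.length)).sum) *
            (((adjacency.flatMap (fun p => p.1 :: p.2)).filter
              (fun u => !(PySem.Set.contains (PySem.Set.add vis node) u))).length) +
            (1 + (adjacency.map (fun p => p.2.length)).sum) ≤
          (1 + (adjacency.map (fun p => p.2.length)).sum) *
            (((adjacency.flatMap (fun p => p.1 :: p.2)).filter
              (fun u => !(PySem.Set.contains vis u))).length) := by
        have h2 := Nat.mul_le_mul_left (1 + (adjacency.map (fun p => p.2.length)).sum) hcnt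
        rw [Nat.mul_succ] at h2
        exact h2
      simp only [List.length_append, List.length_map, List.length_cons]
      linarith [h1, hflt, hlen, hmono]

def bfs_depth_py (adjacency : List (String × List String)) (start : String) : Int :=
  pvALoop adjacency PySem.Set.empty [(start, 0)] 0

-- ===== PORT B =====
-- Literal port of B's while loop: visited set, current frontier set, level counter.
def pvBLoop (adjacency : List (String × List String)) (vis cur : PySem.Set String)
    (depth : Int) : Int :=
  if cur = [] then depth
  else
    let vis' := PySem.Set.union vis cur
    let next := PySem.Set.ofList
      ((cur.flatMap (fun x => (PySem.Dict.mk adjacency).getD x [])).filter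
        (fun y => !(PySem.Set.contains vis' y)))
    if next = [] then depth
    else pvBLoop adjacency vis' next (depth + 1)
  termination_by ((adjacency.flatMap (fun p => p.1 :: p.2)).filter
    (fun u => !(PySem.Set.contains vis u || PySem.Set.contains cur u))).length
  decreasing_by
  · obtain ⟨y, hy⟩ := List.exists_mem_of_ne_nil _ (by assumption : ¬ next = [])
    have hyf := List.mem_filter.1 ((PySem.Set.mem_ofList _ _).1 hy)
    obtain ⟨⟨x, hxmem⟩, hxcur, hyadj⟩ := List.mem_flatMap.1 hyf.1
    have hyU : y ∈ adjacency.flatMap (fun p => p.1 :: p.2) := pvMemGetD adjacency x y hyadj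
    have hynv : y ∉ vis' := (pvNCT vis' y).1 hyf.2
    have hyv : y ∉ vis := fun h => hynv ((PySem.Set.mem_union vis cur y).2 (Or.inl h))
    have hyc : y ∉ cur := fun h => hynv ((PySem.Set.mem_union vis cur y).2 (Or.inr h))
    refine pvFilterLenLt _ ?_ hyU ?_ ?_
    · intro u hu
      simp only [Bool.not_eq_true', Bool.or_eq_false_iff] at hu ⊢
      refine ⟨?_, ?_⟩
      · cases h : PySem.Set.contains vis u with
        | false => rfl
        | true =>
          exfalso
          have hm : u ∈ vis' := (PySem.Set.mem_union vis cur u).2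
            (Or.inl ((PySem.Set.contains_iff vis u).1 h))
          rw [← PySem.Set.contains_iff] at hm
          rw [hu.1] at hm
          exact Bool.false_ne_true hm
      · cases h : PySem.Set.contains cur u with
        | false => rfl
        | true =>
          exfalso
          have hm : u ∈ vis' := (PySem.Set.mem_union vis cur u).2
            (Or.inr ((PySem.Set.contains_iff cur u).1 h))
          rw [← PySem.Set.contains_iff] at hm
          rw [hu.1] at hm
          exact Bool.false_ne_true hm
    · simp only [Bool.not_eq_true', Bool.or_eq_false_iff]
      refine ⟨?_, ?_⟩
      · cases h : PySem.Set.contains vis y with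
        | false => rfl
        | true => exact absurd ((PySem.Set.contains_iff vis y).1 h) hyv
      · cases h : PySem.Set.contains cur y with
        | false => rfl
        | true => exact absurd ((PySem.Set.contains_iff cur y).1 h) hyc
    · have hny : PySem.Set.contains next y = true := (PySem.Set.contains_iff next y).2 hy
      show (!(PySem.Set.contains vis' y || PySem.Set.contains next y)) = false
      rw [hny, Bool.or_true, Bool.not_true]

def bfs_depth_py_alt (adjacency : List (String × List String)) (start : String) : Int :=
  pvBLoop adjacency PySem.Set.empty (PySem.Set.ofList [start]) 0

-- ===== PRECONDITION & SPEC =====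
def Spec_bfs_depth_py (adjacency : List (String × List String)) (start : String) (out : Int) : Prop := out = bfs_depth_py_alt adjacency start
instance (adjacency : List (String × List String)) (start : String) (out : Int) : Decidable (Spec_bfs_depth_py adjacency start out) := by unfold Spec_bfs_depth_py; infer_instance

-- ===== CLAIM (what is proved, stated in full; the proofs are below) =====
def Claim_equal_bfs_depth_py : Prop := ∀ (adjacency : List (String × List String)) (start : String), Dom_bfs_depth_py adjacency start → Spec_bfs_depth_py adjacency start (bfs_depth_py adjacency start)

-- ===== LEMMAS AND PROOFS =====

-- Universe of node names that can ever appear in either traversal.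
def pvUniv (adjacency : List (String × List String)) (start : String) : List String :=
  start :: adjacency.flatMap (fun p => p.1 :: p.2)

-- One whole BFS level of A's loop, folded into a single pass: processes the depth-d
-- prefix F of the queue, accumulating visited set, appended next-level list N and max.
def pvProcLevel (adjacency : List (String × List String)) (vis : PySem.Set String)
    (F N : List String) (m d : Int) : PySem.Set String × List String × Int :=
  match F with
  | [] => (vis, N, m)
  | x :: F' =>
    if PySem.Set.contains vis x then pvProcLevel adjacency vis F' N m d
    else pvProcLevel adjacency (PySem.Set.add vis x) F'
      (N ++ ((PySem.Dict.mk adjacency).getD x []).filter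
        (fun y => !(PySem.Set.contains (PySem.Set.add vis x) y))) (max m d) d

-- A's queue always is (level-d nodes) ++ (level-(d+1) nodes); one level runs as pvProcLevel.
theorem pvReshape (adjacency : List (String × List String)) (F : List String) :
    ∀ (vis : PySem.Set String) (N : List String) (m d : Int),
    pvALoop adjacency vis (F.map (fun x => (x, d)) ++ N.map (fun y => (y, d + 1))) m
      = pvALoop adjacency (pvProcLevel adjacency vis F N m d).1
          ((pvProcLevel adjacency vis F N m d).2.1.map (fun y => (y, d + 1)))
          (pvProcLevel adjacency vis F N m d).2.2 := by
  induction F with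
  | nil => intro vis N m d; simp [pvProcLevel]
  | cons x F' ih =>
    intro vis N m d
    rw [List.map_cons, List.cons_append, pvALoop]
    by_cases h : PySem.Set.contains vis x
    · simp only [h, if_true]
      rw [ih, pvProcLevel]
      simp only [h, if_true]
    · simp only [h, if_false, Bool.false_eq_true]
      rw [List.append_assoc, ← List.map_append, ih, pvProcLevel]
      simp only [h, if_false, Bool.false_eq_true]

-- The visited set only grows across a level.
theorem pvProcVisMono (adjacency : List (String × List String)) (F : List String) :
    ∀ (vis : PySem.Set String) (N : List String) (m d : Int) (y : String),
    y ∈ vis → y ∈ (pvProcLevel adjacency vis F N m d).1 := by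
  induction F with
  | nil => intro vis N m d y hy; simpa [pvProcLevel] using hy
  | cons x F' ih =>
    intro vis N m d y hy
    rw [pvProcLevel]
    by_cases h : PySem.Set.contains vis x
    · simp only [h, if_true]; exact ih vis N m d y hy
    · simp only [h, if_false, Bool.false_eq_true]
      exact ih _ _ _ _ y ((PySem.Set.mem_add vis x y).2 (Or.inl hy))

-- After a level the visited set is exactly vis ∪ F.
theorem pvProcVisMem (adjacency : List (String × List String)) (F : List String) :
    ∀ (vis : PySem.Set String) (N : List String) (m d : Int) (y : String),
    y ∈ (pvProcLevel adjacency vis F N m d).1 ↔ y ∈ vis ∨ y ∈ F := by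
  induction F with
  | nil => intro vis N m d y; simp [pvProcLevel]
  | cons x F' ih =>
    intro vis N m d y
    rw [pvProcLevel]
    by_cases h : PySem.Set.contains vis x
    · simp only [h, if_true]
      rw [ih]
      have hx : x ∈ vis := (PySem.Set.contains_iff vis x).1 h
      simp only [List.mem_cons]
      constructor
      · rintro (hv | hf); exacts [Or.inl hv, Or.inr (Or.inr hf)]
      · rintro (hv | rfl | hf); exacts [Or.inl hv, Or.inl hx, Or.inr hf]
    · simp only [h, if_false, Bool.false_eq_true]
      rw [ih]
      rw [PySem.Set.mem_add]
      simp only [List.mem_cons]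
      tauto

-- The running max after a level: it becomes max m d iff some level-d node was new.
theorem pvProcM (adjacency : List (String × List String)) (F : List String) :
    ∀ (vis : PySem.Set String) (N : List String) (m d : Int),
    (pvProcLevel adjacency vis F N m d).2.2
      = if ∃ x ∈ F, x ∉ vis then max m d else m := by
  induction F with
  | nil => intro vis N m d; simp [pvProcLevel]
  | cons x F' ih =>
    intro vis N m d
    rw [pvProcLevel]
    by_cases h : PySem.Set.contains vis x
    · simp only [h, if_true]
      rw [ih]
      have hx : x ∈ vis := (PySem.Set.contains_iff vis x).1 h
      by_cases hex : ∃ z ∈ F', z ∉ vis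
      · rw [if_pos hex, if_pos (by obtain ⟨z, hz1, hz2⟩ := hex; exact ⟨z, List.mem_cons_of_mem x hz1, hz2⟩)]
      · rw [if_neg hex, if_neg (by
          rintro ⟨z, hz1, hz2⟩
          rcases List.mem_cons.1 hz1 with rfl | hz1'
          · exact hz2 hx
          · exact hex ⟨z, hz1', hz2⟩)]
    · have hx : x ∉ vis := fun hm => h ((PySem.Set.contains_iff vis x).2 hm)
      simp only [h, if_false, Bool.false_eq_true]
      rw [ih]
      have hmax : max (max m d) d = max m d := by rw [max_assoc, max_self]
      rw [if_pos (⟨x, List.mem_cons_self, hx⟩ : ∃ z ∈ x :: F', z ∉ vis)]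
      by_cases hex : ∃ z ∈ F', z ∉ PySem.Set.add vis x
      · rw [if_pos hex, hmax]
      · rw [if_neg hex]

-- Everything the level appends comes from the adjacency lists.
theorem pvProcNSub (adjacency : List (String × List String)) (F : List String) :
    ∀ (vis : PySem.Set String) (N : List String) (m d : Int) (y : String),
    y ∈ (pvProcLevel adjacency vis F N m d).2.1 →
      y ∈ N ∨ y ∈ adjacency.flatMap (fun p => p.1 :: p.2) := by
  induction F with
  | nil => intro vis N m d y hy; exact Or.inl (by simpa [pvProcLevel] using hy)
  | cons x F' ih =>
    intro vis N m d y hy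
    rw [pvProcLevel] at hy
    by_cases h : PySem.Set.contains vis x
    · simp only [h, if_true] at hy
      exact ih vis N m d y hy
    · simp only [h, if_false, Bool.false_eq_true] at hy
      rcases ih _ _ _ _ y hy with hN | hU
      · rcases List.mem_append.1 hN with hN' | hflt
        · exact Or.inl hN'
        · exact Or.inr (pvMemGetD adjacency x y (List.mem_filter.1 hflt).1)
      · exact Or.inr hU

-- Membership in the appended next-level list, for nodes the level did not visit.
theorem pvProcNMem (adjacency : List (String × List String)) (F : List String) :
    ∀ (vis : PySem.Set String) (N : List String) (m d : Int) (y : String),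
    y ∉ (pvProcLevel adjacency vis F N m d).1 →
    (y ∈ (pvProcLevel adjacency vis F N m d).2.1 ↔
      y ∈ N ∨ ∃ x ∈ F, x ∉ vis ∧ y ∈ (PySem.Dict.mk adjacency).getD x []) := by
  induction F with
  | nil => intro vis N m d y _; simp [pvProcLevel]
  | cons x F' ih =>
    intro vis N m d y hyv
    rw [pvProcLevel] at hyv ⊢
    by_cases h : PySem.Set.contains vis x
    · have hx : x ∈ vis := (PySem.Set.contains_iff vis x).1 h
      simp only [h, if_true] at hyv ⊢
      rw [ih vis N m d y hyv]
      constructor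
      · rintro (hN | ⟨z, hz1, hz2, hz3⟩)
        · exact Or.inl hN
        · exact Or.inr ⟨z, List.mem_cons_of_mem x hz1, hz2, hz3⟩
      · rintro (hN | ⟨z, hz1, hz2, hz3⟩)
        · exact Or.inl hN
        · rcases List.mem_cons.1 hz1 with rfl | hz1'
          · exact absurd hx hz2
          · exact Or.inr ⟨z, hz1', hz2, hz3⟩
    · have hx : x ∉ vis := fun hm => h ((PySem.Set.contains_iff vis x).2 hm)
      simp only [h, if_false, Bool.false_eq_true] at hyv ⊢
      have hyv1 : y ∉ PySem.Set.add vis x := fun hm =>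
        hyv (pvProcVisMono adjacency F' _ _ _ _ y hm)
      have hyvis : y ∉ vis := fun hm => hyv1 ((PySem.Set.mem_add vis x y).2 (Or.inl hm))
      have hynex : y ≠ x := fun hm => hyv1 ((PySem.Set.mem_add vis x y).2 (Or.inr hm))
      rw [ih _ _ _ _ y hyv]
      have hflt : y ∈ ((PySem.Dict.mk adjacency).getD x []).filter
          (fun z => !(PySem.Set.contains (PySem.Set.add vis x) z)) ↔
          y ∈ (PySem.Dict.mk adjacency).getD x [] := by
        constructor
        · intro hm; exact (List.mem_filter.1 hm).1
        · intro hm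
          refine List.mem_filter.2 ⟨hm, ?_⟩
          exact (pvNCT _ y).2 hyv1
      constructor
      · rintro (hN | ⟨z, hz1, hz2, hz3⟩)
        · rcases List.mem_append.1 hN with hN' | hf
          · exact Or.inl hN'
          · exact Or.inr ⟨x, List.mem_cons_self, hx, hflt.1 hf⟩
        · refine Or.inr ⟨z, List.mem_cons_of_mem x hz1, fun hm => hz2 ((PySem.Set.mem_add vis x z).2 (Or.inl hm)), hz3⟩
      · rintro (hN | ⟨z, hz1, hz2, hz3⟩)
        · exact Or.inl (List.mem_append.2 (Or.inl hN))
        · rcases List.mem_cons.1 hz1 with rfl | hz1'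
          · exact Or.inl (List.mem_append.2 (Or.inr (hflt.2 hz3)))
          · by_cases hzx : z = x
            · subst hzx
              exact Or.inl (List.mem_append.2 (Or.inr (hflt.2 hz3)))
            · refine Or.inr ⟨z, hz1', fun hm => ?_, hz3⟩
              rcases (PySem.Set.mem_add vis x z).1 hm with hm' | hm'
              · exact hz2 hm'
              · exact hzx hm'

-- A queue of already-visited nodes is drained without effect.
theorem pvAllVisited (adjacency : List (String × List String)) (F : List String) :
    ∀ (vis : PySem.Set String) (m d : Int), (∀ x ∈ F, x ∈ vis) →
    pvALoop adjacency vis (F.map (fun x => (x, d))) m = m := by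
  induction F with
  | nil => intro vis m d _; rw [List.map_nil, pvALoop]
  | cons x F' ih =>
    intro vis m d h
    rw [List.map_cons, pvALoop]
    have hx : PySem.Set.contains vis x = true :=
      (PySem.Set.contains_iff vis x).2 (h x (List.mem_cons_self))
    simp only [hx, if_true]
    exact ih vis m d (fun z hz => h z (List.mem_cons_of_mem x hz))

-- Coupling invariant: one level of A's queue equals one iteration of B's frontier loop.
theorem pvMain (adjacency : List (String × List String)) (start : String) :
    ∀ (n : Nat) (visA visB cur : PySem.Set String) (F : List String) (d m : Int),
    ((pvUniv adjacency start).filter (fun u => !(PySem.Set.contains visA u))).length = n →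
    (∀ y, y ∈ visA ↔ y ∈ visB) →
    (∀ y, y ∈ cur ↔ y ∈ F ∧ y ∉ visA) →
    (∀ x ∈ F, x ∈ pvUniv adjacency start) →
    m ≤ d → (cur = [] → m = d) →
    pvALoop adjacency visA (F.map (fun x => (x, d))) m = pvBLoop adjacency visB cur d := by
  intro n
  induction n using Nat.strong_induction_on with
  | _ n ih =>
    intro visA visB cur F d m hn hAB hcur hFU hmd hm0
    rw [pvBLoop]
    by_cases hce : cur = []
    · rw [if_pos hce]
      have hall : ∀ x ∈ F, x ∈ visA := by
        intro x hx
        by_contra hxv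
        have : x ∈ cur := (hcur x).2 ⟨hx, hxv⟩
        rw [hce] at this
        exact absurd this (List.not_mem_nil)
      rw [pvAllVisited adjacency F visA m d hall]
      exact hm0 hce
    · rw [if_neg hce]
      obtain ⟨y0, hy0⟩ := List.exists_mem_of_ne_nil cur hce
      obtain ⟨hy0F, hy0v⟩ := (hcur y0).1 hy0
      have hstep : F.map (fun x => (x, d)) = F.map (fun x => (x, d)) ++
          (([] : List String).map (fun y => (y, d + 1))) := by simp
      rw [hstep, pvReshape adjacency F visA [] m d]
      have hm' : (pvProcLevel adjacency visA F [] m d).2.2 = d := by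
        rw [pvProcM adjacency F visA [] m d, if_pos ⟨y0, hy0F, hy0v⟩]
        exact max_eq_right hmd
      rw [hm']
      -- the next frontier B computes
      by_cases hnext : PySem.Set.ofList
          ((cur.flatMap (fun x => (PySem.Dict.mk adjacency).getD x [])).filter
            (fun y => !(PySem.Set.contains (PySem.Set.union visB cur) y))) = []
      · rw [if_pos hnext]
        -- everything A appended is already visited: the tail drains without effect
        refine pvAllVisited adjacency _ _ d (d+1) ?_
        intro y hy
        by_contra hyv
        have hmem := (pvProcNMem adjacency F visA [] m d y hyv).1 hy
        rcases hmem with hN | ⟨x, hxF, hxv, hyadj⟩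
        · exact absurd hN (List.not_mem_nil)
        · have hynA : y ∉ visA ∧ y ∉ F := by
            have := fun hm => hyv ((pvProcVisMem adjacency F visA [] m d y).2 hm)
            exact ⟨fun h => this (Or.inl h), fun h => this (Or.inr h)⟩
          have hnu : y ∉ PySem.Set.union visB cur := by
            intro hm
            rcases (PySem.Set.mem_union visB cur y).1 hm with hm' | hm'
            · exact hynA.1 ((hAB y).2 hm')
            · exact hynA.2 ((hcur y).1 hm').1
          have hyL : y ∈ (cur.flatMap (fun x => (PySem.Dict.mk adjacency).getD x [])).filter
              (fun z => !(PySem.Set.contains (PySem.Set.union visB cur) z)) := by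
            refine List.mem_filter.2 ⟨?_, (pvNCT _ y).2 hnu⟩
            exact List.mem_flatMap.2 ⟨x, (hcur x).2 ⟨hxF, hxv⟩, hyadj⟩
          have : y ∈ (PySem.Set.ofList ((cur.flatMap (fun x => (PySem.Dict.mk adjacency).getD x [])).filter
              (fun z => !(PySem.Set.contains (PySem.Set.union visB cur) z)))) :=
            (PySem.Set.mem_ofList _ _).2 hyL
          rw [hnext] at this
          exact absurd this (List.not_mem_nil)
      · rw [if_neg hnext]
        -- recurse: the coupled states one level down
        refine ih (((pvUniv adjacency start).filter
            (fun u => !(PySem.Set.contains (pvProcLevel adjacency visA F [] m d).1 u))).length)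
          ?_ _ _ _ _ (d+1) d rfl ?_ ?_ ?_ (by omega) ?_
        · -- strict decrease of the unvisited count
          rw [← hn]
          refine pvFilterLenLt (pvUniv adjacency start) ?_ (hFU y0 hy0F) ?_ ?_
          · intro u hu
            rw [pvNCT] at hu ⊢
            intro hm
            exact hu ((pvProcVisMem adjacency F visA [] m d u).2 (Or.inl hm))
          · rw [pvNCT]; exact hy0v
          · rw [pvNCF]
            exact (pvProcVisMem adjacency F visA [] m d y0).2 (Or.inr hy0F)
        · -- visited sets stay equal
          intro y
          rw [pvProcVisMem adjacency F visA [] m d y, PySem.Set.mem_union]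
          constructor
          · rintro (h | h)
            · exact Or.inl ((hAB y).1 h)
            · by_cases hyA : y ∈ visA
              · exact Or.inl ((hAB y).1 hyA)
              · exact Or.inr ((hcur y).2 ⟨h, hyA⟩)
          · rintro (h | h)
            · exact Or.inl ((hAB y).2 h)
            · exact Or.inr ((hcur y).1 h).1
        · -- the frontier is exactly the new unvisited appended nodes
          intro y
          constructor
          · intro hy
            have hyL := (PySem.Set.mem_ofList _ _).1 hy
            have hyf := List.mem_filter.1 hyL
            obtain ⟨x, hxcur, hyadj⟩ := List.mem_flatMap.1 hyf.1
            have hnu : y ∉ PySem.Set.union visB cur := (pvNCT _ y).1 hyf.2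
            have hyB : y ∉ visB := fun h => hnu ((PySem.Set.mem_union visB cur y).2 (Or.inl h))
            have hyc : y ∉ cur := fun h => hnu ((PySem.Set.mem_union visB cur y).2 (Or.inr h))
            have hyA : y ∉ visA := fun h => hyB ((hAB y).1 h)
            have hyF : y ∉ F := fun h => hyc ((hcur y).2 ⟨h, hyA⟩)
            have hyP : y ∉ (pvProcLevel adjacency visA F [] m d).1 := by
              intro hm
              rcases (pvProcVisMem adjacency F visA [] m d y).1 hm with h | h
              · exact hyA h
              · exact hyF h
            refine ⟨?_, hyP⟩
            refine (pvProcNMem adjacency F visA [] m d y hyP).2 ?_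
            obtain ⟨hxF, hxv⟩ := (hcur x).1 hxcur
            exact Or.inr ⟨x, hxF, hxv, hyadj⟩
          · rintro ⟨hyN, hyP⟩
            rcases (pvProcNMem adjacency F visA [] m d y hyP).1 hyN with hN | ⟨x, hxF, hxv, hyadj⟩
            · exact absurd hN (List.not_mem_nil)
            · have hynA : y ∉ visA ∧ y ∉ F := by
                have := fun hm => hyP ((pvProcVisMem adjacency F visA [] m d y).2 hm)
                exact ⟨fun h => this (Or.inl h), fun h => this (Or.inr h)⟩
              have hnu : y ∉ PySem.Set.union visB cur := by
                intro hm
                rcases (PySem.Set.mem_union visB cur y).1 hm with hm' | hm'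
                · exact hynA.1 ((hAB y).2 hm')
                · exact hynA.2 ((hcur y).1 hm').1
              refine (PySem.Set.mem_ofList _ _).2 (List.mem_filter.2 ⟨?_, (pvNCT _ y).2 hnu⟩)
              exact List.mem_flatMap.2 ⟨x, (hcur x).2 ⟨hxF, hxv⟩, hyadj⟩
        · -- appended nodes live in the universe
          intro y hy
          rcases pvProcNSub adjacency F visA [] m d y hy with hN | hU
          · exact absurd hN (List.not_mem_nil)
          · exact List.mem_cons_of_mem start hU
        · intro h
          exact absurd h hnext

-- ===== VERDICT (by name: the statement is the Claim_ definition above) =====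
theorem bfs_depth_py_spec : Claim_equal_bfs_depth_py := by
  unfold Claim_equal_bfs_depth_py Spec_bfs_depth_py
  intro adjacency start _
  show pvALoop adjacency PySem.Set.empty ([start].map (fun x => (x, 0))) 0
    = pvBLoop adjacency PySem.Set.empty (PySem.Set.ofList [start]) 0
  refine pvMain adjacency start _ PySem.Set.empty PySem.Set.empty (PySem.Set.ofList [start])
    [start] 0 0 rfl ?_ ?_ ?_ le_rfl ?_
  · intro y; rfl
  · intro y
    rw [PySem.Set.mem_ofList]
    simp [PySem.Set.empty]
  · intro x hx
    rcases List.mem_cons.1 hx with rfl | h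
    · exact List.mem_cons_self
    · exact absurd h (List.not_mem_nil)
  · intro h
    simp [PySem.Set.ofList, PySem.Set.add, PySem.Set.contains] at h
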